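-- pv_equiv track=rewrite | github.com/pannaf/crossfit-leaderboard-remix | scripts/points_gain_within5s_2025_men.py | build_points_lookup
-- ===== SOURCE A (Python) =====
-- from typing import Dict, List, Optional
--
-- def build_points_lookup(finish_rows: List[Dict]) -> Dict[int, int]:
--     lookup: Dict[int, int] = {}
--     for r in finish_rows:
--         place = int(r.get("place", 0) or 0)
--         pts = int(r.get("points", 0) or 0)
--         if place and (place not in lookup or pts > lookup[place]):
--             lookup[place] = pts
--     return lookup
-- ===== SOURCE B (Python) =====
-- from typing import Dict, List
--
-- def build_points_lookup(finish_rows: List[Dict]) -> Dict[int, int]: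
--     # Pass 1: group the points of every truthy place, in first-appearance order.
--     groups: Dict[int, List[int]] = {}
--     for r in finish_rows:
--         place = int(r.get("place", 0) or 0)
--         pts = int(r.get("points", 0) or 0)
--         if place:
--             groups[place] = groups.get(place, []) + [pts]
--     # Pass 2: reduce each group to its maximum.
--     return {place: max(vals) for place, vals in groups.items()}
-- ===== Notes on version B (the rewrite author's own statement) =====
-- stated objective: alternative
-- what changed: Replaces A's single-pass running-max dict update with a two-pass group-then-reduce: first collect each truthy place's points into lists (first-appearance order), then map each group to its maximum.
import Mathlib
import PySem

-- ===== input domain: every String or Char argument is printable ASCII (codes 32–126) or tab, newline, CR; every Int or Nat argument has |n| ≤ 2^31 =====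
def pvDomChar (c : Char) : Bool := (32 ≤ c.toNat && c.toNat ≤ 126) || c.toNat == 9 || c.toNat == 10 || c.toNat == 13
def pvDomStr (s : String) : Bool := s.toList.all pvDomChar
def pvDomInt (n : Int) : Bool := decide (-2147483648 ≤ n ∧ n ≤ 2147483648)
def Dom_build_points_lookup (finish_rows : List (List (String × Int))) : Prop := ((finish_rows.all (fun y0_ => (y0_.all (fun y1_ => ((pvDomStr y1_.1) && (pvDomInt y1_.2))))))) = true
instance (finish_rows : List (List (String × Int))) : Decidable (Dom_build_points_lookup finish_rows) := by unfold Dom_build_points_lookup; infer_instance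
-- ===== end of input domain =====

-- B replaces A's single-pass running-max dict with a two-pass group-then-reduce (collect each
-- place's points into lists, then take each group's max); alternative decomposition, same cost.


-- ===== PORT A =====
-- int(r.get(k, 0) or 0): the values are ints, so `v or 0` is v for v ≠ 0 and 0 for v = 0 — i.e. v
-- itself — and int(v) = v; exact on all Int values.
def pvGetInt (r : List (String × Int)) (k : String) : Int := (PySem.Dict.mk r).getD k 0

def build_points_lookup (finish_rows : List (List (String × Int))) : List (Int × Int) :=
  (finish_rows.foldl (fun lookup r =>
      let place : Int := pvGetInt r "place"
      let pts : Int := pvGetInt r "points"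
      if place ≠ 0 ∧ (lookup.contains place = false ∨ lookup.getD place 0 < pts) then
        lookup.insert place pts
      else lookup)
    (PySem.Dict.empty : PySem.Dict Int Int)).items

-- ===== PORT B =====
-- Python max(vals) on a nonempty list of ints; the [] branch is unreachable here (groups only
-- ever gains nonempty lists).
def pyMax : List Int → Int
  | [] => 0
  | h :: t => t.foldl max h

def build_points_lookup_alt (finish_rows : List (List (String × Int))) : List (Int × Int) :=
  let groups :=
    finish_rows.foldl (fun g r =>
        let place : Int := pvGetInt r "place"
        let pts : Int := pvGetInt r "points"
        if place ≠ 0 then g.insert place (g.getD place [] ++ [pts]) else g)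
      (PySem.Dict.empty : PySem.Dict Int (List Int))
  groups.items.map (fun p => (p.1, pyMax p.2))

-- ===== PRECONDITION & SPEC =====
def Spec_build_points_lookup (finish_rows : List (List (String × Int))) (out : List (Int × Int)) : Prop := out = build_points_lookup_alt finish_rows
instance (finish_rows : List (List (String × Int))) (out : List (Int × Int)) : Decidable (Spec_build_points_lookup finish_rows out) := by unfold Spec_build_points_lookup; infer_instance

-- ===== CLAIM (what is proved, stated in full; the proofs are below) =====
def Claim_equal_build_points_lookup : Prop := ∀ (finish_rows : List (List (String × Int))), Dom_build_points_lookup finish_rows → Spec_build_points_lookup finish_rows (build_points_lookup finish_rows)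

-- ===== LEMMAS AND PROOFS =====

-- A's loop body and B's first-pass loop body, named for the proofs (the ports inline them).
def stepA (lookup : PySem.Dict Int Int) (r : List (String × Int)) : PySem.Dict Int Int :=
  let place : Int := pvGetInt r "place"
  let pts : Int := pvGetInt r "points"
  if place ≠ 0 ∧ (lookup.contains place = false ∨ lookup.getD place 0 < pts) then
    lookup.insert place pts
  else lookup

def stepB (g : PySem.Dict Int (List Int)) (r : List (String × Int)) : PySem.Dict Int (List Int) :=
  let place : Int := pvGetInt r "place"
  let pts : Int := pvGetInt r "points"
  if place ≠ 0 then g.insert place (g.getD place [] ++ [pts]) else g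

def relAB (D : PySem.Dict Int Int) (G : PySem.Dict Int (List Int)) : Prop :=
  D.items = G.items.map (fun p => (p.1, pyMax p.2))

lemma keys_of_relAB (D : PySem.Dict Int Int) (G : PySem.Dict Int (List Int))
    (h : relAB D G) : D.keys = G.keys := by
  simp only [PySem.Dict.keys, relAB] at *
  rw [h, List.map_map]
  rfl

lemma pyMax_append (vs : List Int) (x : Int) (h : vs ≠ []) :
    pyMax (vs ++ [x]) = max (pyMax vs) x := by
  cases vs with
  | nil => exact absurd rfl h
  | cons a t => simp [pyMax, List.foldl_append]

lemma step_preserves (r : List (String × Int)) (D : PySem.Dict Int Int)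
    (G : PySem.Dict Int (List Int)) (hnd : G.keys.Nodup) (hrel : relAB D G)
    (hne : ∀ p ∈ G.items, p.2 ≠ []) :
    relAB (stepA D r) (stepB G r) ∧ (stepB G r).keys.Nodup ∧
      ∀ p ∈ (stepB G r).items, p.2 ≠ [] := by
  have hkeys : D.keys = G.keys := keys_of_relAB D G hrel
  have hndD : D.keys.Nodup := hkeys ▸ hnd
  have hcont : ∀ k : Int, D.contains k = G.contains k := by
    intro k
    rw [PySem.Dict.contains_eq_decide_mem_keys, PySem.Dict.contains_eq_decide_mem_keys, hkeys]
  set place := pvGetInt r "place" with hplace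
  set pts := pvGetInt r "points" with hpts
  by_cases hp0 : place = 0
  · -- place = 0: both steps leave their dict unchanged
    have hA : stepA D r = D := by simp [stepA, ← hplace, hp0]
    have hB : stepB G r = G := by simp [stepB, ← hplace, hp0]
    rw [hA, hB]
    exact ⟨hrel, hnd, hne⟩
  · by_cases hc : G.contains place = true
    · -- place already present: B appends to the group in place
      have hBset : stepB G r = G.insert place (G.getD place [] ++ [pts]) := by
        simp only [stepB, ← hplace, ← hpts, hp0, ne_eq, not_false_eq_true, if_true]
      have hBitems : (stepB G r).items =
          G.items.map (fun p => if p.1 == place then (place, G.getD place [] ++ [pts]) else p) := by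
        rw [hBset]
        exact PySem.Dict.items_insert_of_contains G _ hc
      refine ⟨?_, ?_, ?_⟩
      · -- the relation
        by_cases hgt : D.getD place 0 < pts
        · -- A overwrites in place with pts
          have hA : stepA D r = D.insert place pts := by
            simp only [stepA, ← hplace, ← hpts]
            rw [if_pos ⟨hp0, Or.inr hgt⟩]
          have hcD : D.contains place = true := by rw [hcont]; exact hc
          rw [relAB, hA, PySem.Dict.items_insert_of_contains D _ hcD, hBitems, hrel,
            List.map_map, List.map_map]
          refine List.map_congr_left ?_
          intro p hpmem
          by_cases he : p.1 = place
          · have hgetGp : G.getD place [] = p.2 := by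
              refine PySem.Dict.getD_of_mem_items G ?_ hnd []
              rwa [← he, Prod.mk.eta]
            have hpne : p.2 ≠ [] := hne p hpmem
            have hmaxp : D.getD place 0 = pyMax p.2 := by
              refine PySem.Dict.getD_of_mem_items D ?_ hndD 0
              rw [hrel]
              have : (p.1, pyMax p.2) ∈ G.items.map (fun p => (p.1, pyMax p.2)) :=
                List.mem_map_of_mem hpmem
              rwa [he] at this
            have hlt : pyMax p.2 < pts := hmaxp ▸ hgt
            simp only [Function.comp_apply, he, beq_self_eq_true, if_true, hgetGp,
              pyMax_append p.2 pts hpne]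
            rw [max_eq_right (le_of_lt hlt)]
          · simp only [Function.comp_apply, beq_iff_eq, he, if_false]
        · -- A leaves the dict unchanged; the group max is unchanged too
          have hA : stepA D r = D := by
            simp only [stepA, ← hplace, ← hpts]
            rw [if_neg]
            rintro ⟨-, h | h⟩
            · rw [hcont] at h; simp [hc] at h
            · exact hgt h
          rw [relAB, hA, hBitems, hrel, List.map_map]
          refine List.map_congr_left ?_
          intro p hpmem
          by_cases he : p.1 = place
          · have hgetGp : G.getD place [] = p.2 := by
              refine PySem.Dict.getD_of_mem_items G ?_ hnd []
              rwa [← he, Prod.mk.eta]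
            have hpne : p.2 ≠ [] := hne p hpmem
            have hmaxp : D.getD place 0 = pyMax p.2 := by
              refine PySem.Dict.getD_of_mem_items D ?_ hndD 0
              rw [hrel]
              have : (p.1, pyMax p.2) ∈ G.items.map (fun p => (p.1, pyMax p.2)) :=
                List.mem_map_of_mem hpmem
              rwa [he] at this
            have hle : pts ≤ pyMax p.2 := by
              have := hmaxp ▸ hgt; omega
            simp only [Function.comp_apply, he, beq_self_eq_true, if_true, hgetGp,
              pyMax_append p.2 pts hpne]
            rw [max_eq_left hle]
          · simp only [Function.comp_apply, beq_iff_eq, he, if_false]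
      · rw [hBset]; exact PySem.Dict.nodup_keys_insert _ _ _ hnd
      · intro p hpmem
        rw [hBset] at hpmem
        rcases (PySem.Dict.mem_items_insert _ _ _ _).mp hpmem with h | ⟨h, -⟩
        · rw [h]; simp
        · exact hne p h
    · -- fresh place: both append a new entry
      have hcG : G.contains place = false := by simpa using hc
      have hcD : D.contains place = false := by rw [hcont]; exact hcG
      have hA : stepA D r = D.insert place pts := by
        simp only [stepA, ← hplace, ← hpts]
        rw [if_pos ⟨hp0, Or.inl hcD⟩]
      have hB : stepB G r = G.insert place (G.getD place [] ++ [pts]) := by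
        simp only [stepB, ← hplace, ← hpts, hp0, ne_eq, not_false_eq_true, if_true]
      have hgetG : G.getD place [] = [] := PySem.Dict.getD_of_not_contains G [] hcG
      refine ⟨?_, ?_, ?_⟩
      · rw [relAB, hA, hB, PySem.Dict.items_insert_of_not_contains D _ hcD,
          PySem.Dict.items_insert_of_not_contains G _ hcG, hgetG, List.map_append, ← hrel]
        simp [pyMax]
      · rw [hB]; exact PySem.Dict.nodup_keys_insert _ _ _ hnd
      · intro p hpmem
        rw [hB] at hpmem
        rcases (PySem.Dict.mem_items_insert _ _ _ _).mp hpmem with h | ⟨h, -⟩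
        · rw [h]; simp
        · exact hne p h

lemma fold_preserves (rows : List (List (String × Int))) (D : PySem.Dict Int Int)
    (G : PySem.Dict Int (List Int)) (hnd : G.keys.Nodup) (hrel : relAB D G)
    (hne : ∀ p ∈ G.items, p.2 ≠ []) :
    relAB (rows.foldl stepA D) (rows.foldl stepB G) := by
  induction rows generalizing D G with
  | nil => exact hrel
  | cons r t ih =>
    obtain ⟨h1, h2, h3⟩ := step_preserves r D G hnd hrel hne
    exact ih _ _ h2 h1 h3

-- ===== VERDICT (by name: the statement is the Claim_ definition above) =====
theorem build_points_lookup_spec : Claim_equal_build_points_lookup := by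
  intro rows _
  show build_points_lookup rows = build_points_lookup_alt rows
  exact fold_preserves rows (PySem.Dict.empty : PySem.Dict Int Int)
    (PySem.Dict.empty : PySem.Dict Int (List Int))
    (by simp [PySem.Dict.keys_empty]) (by rfl)
    (by intro p h
        exact absurd h (by
          simp [show (PySem.Dict.empty : PySem.Dict Int (List Int)).items = [] from rfl]))
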